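-- pv_equiv track=rewrite | github.com/lipan6461188/RIP-icSHAPE-MaP | Figure_S1/Figure S1f-Count mutation frenquency of each reads.py | mutate_count
-- ===== SOURCE A (Python) =====
-- def mutate_count(Cigar, MD_tag):
--     counts = 0
--
--     deletion_state = False
--     for alpha in list(MD_tag):
--         if '0'<=alpha<='9':
--             deletion_state = False
--         else:
--             if alpha == '^':
--                 deletion_state = True
--                 counts += 1
--             elif alpha in ('A','T','C','G'):
--                 if not deletion_state:
--                     counts += 1
--
--     counts += Cigar.count('I')
--
--     return counts
-- ===== SOURCE B (Python) =====
-- def _strip_deletions(md):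
--     """Remove each deletion run: a '^' together with the following
--     non-digit characters (the run ends at the next digit)."""
--     out = []
--     i = 0
--     n = len(md)
--     while i < n:
--         c = md[i]
--         i += 1
--         if c == '^':
--             while i < n and not ('0' <= md[i] <= '9'):
--                 i += 1
--         else:
--             out.append(c)
--     return out
--
--
-- def mutate_count(Cigar, MD_tag):
--     cleaned = _strip_deletions(MD_tag)
--     mismatches = sum(ch in ('A', 'T', 'C', 'G') for ch in cleaned)
--     return mismatches + MD_tag.count('^') + Cigar.count('I')
-- ===== Notes on version B (the rewrite author's own statement) =====
-- stated objective: alternative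
-- what changed: Replaces A's single stateful char loop carrying a deletion_state flag by three independent passes: first strip every deletion run ('^' plus following non-digits) from MD_tag, then count A/T/C/G in the cleaned text, plus '^' counted on the original MD_tag, plus 'I' in the Cigar.
import Mathlib
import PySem

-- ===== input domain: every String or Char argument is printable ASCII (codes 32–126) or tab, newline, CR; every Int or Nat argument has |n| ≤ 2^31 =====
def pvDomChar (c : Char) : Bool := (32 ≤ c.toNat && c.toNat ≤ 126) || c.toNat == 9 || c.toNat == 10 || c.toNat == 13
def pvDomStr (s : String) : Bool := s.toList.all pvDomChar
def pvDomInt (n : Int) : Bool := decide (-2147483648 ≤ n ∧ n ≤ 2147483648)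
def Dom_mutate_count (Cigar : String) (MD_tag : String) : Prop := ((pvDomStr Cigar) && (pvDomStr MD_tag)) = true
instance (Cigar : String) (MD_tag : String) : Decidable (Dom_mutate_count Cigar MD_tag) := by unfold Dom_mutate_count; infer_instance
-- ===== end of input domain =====

-- B replaces A's single stateful loop by a strip-deletion-runs pass plus three independent counts (alternative decomposition, same cost).

-- ===== PORT A =====
-- A's loop body, one step per character of MD_tag, state = (counts, deletion_state)
def pvStepA (st : Int × Bool) (alpha : Char) : Int × Bool :=
  if '0' ≤ alpha ∧ alpha ≤ '9' then (st.1, false)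
  else if alpha = '^' then (st.1 + 1, true)
  else if alpha = 'A' ∨ alpha = 'T' ∨ alpha = 'C' ∨ alpha = 'G' then
    (if st.2 = false then (st.1 + 1, st.2) else st)
  else st

def mutate_count (Cigar : String) (MD_tag : String) : Int :=
  let r := MD_tag.toList.foldl pvStepA (0, false)
  r.1 + (PySem.Str.count Cigar "I" : Int)

-- ===== PORT B =====
def pvNonDigit (d : Char) : Bool := !(decide ('0' ≤ d) && decide (d ≤ '9'))

-- _strip_deletions: drop '^' and the run of non-digits after it (inner while = dropWhile)
def pvStrip : List Char → List Char
  | [] => []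
  | c :: rest =>
    if c = '^' then pvStrip (rest.dropWhile pvNonDigit)
    else c :: pvStrip rest
termination_by l => l.length
decreasing_by
  · exact Nat.lt_succ_of_le (List.length_dropWhile_le _ _)
  · simp

def pvIsATCG (ch : Char) : Bool := ch = 'A' ∨ ch = 'T' ∨ ch = 'C' ∨ ch = 'G'

def mutate_count_alt (Cigar : String) (MD_tag : String) : Int :=
  let cleaned := pvStrip MD_tag.toList
  ((cleaned.countP pvIsATCG : Int))
    + (PySem.Str.count MD_tag "^" : Int) + (PySem.Str.count Cigar "I" : Int)

-- ===== PRECONDITION & SPEC =====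
def Spec_mutate_count (Cigar : String) (MD_tag : String) (out : Int) : Prop := out = mutate_count_alt Cigar MD_tag
instance (Cigar : String) (MD_tag : String) (out : Int) : Decidable (Spec_mutate_count Cigar MD_tag out) := by unfold Spec_mutate_count; infer_instance

-- ===== CLAIM (what is proved, stated in full; the proofs are below) =====
def Claim_equal_mutate_count : Prop := ∀ (Cigar : String) (MD_tag : String), Dom_mutate_count Cigar MD_tag → Spec_mutate_count Cigar MD_tag (mutate_count Cigar MD_tag)

-- ===== LEMMAS AND PROOFS =====

-- single-character Python str.count is plain list count
lemma count_go_singleton (c : Char) (l : List Char) (fuel acc : Nat) (h : l.length ≤ fuel) :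
    PySem.Chars.count.go [c] fuel l acc = acc + l.count c := by
  induction l generalizing fuel acc with
  | nil => cases fuel <;> simp [PySem.Chars.count.go]
  | cons x t ih =>
    cases fuel with
    | zero => simp at h
    | succ n =>
      simp only [List.length_cons, Nat.succ_le_succ_iff] at h
      by_cases hx : x = c
      · subst hx
        simp [PySem.Chars.count.go, List.isPrefixOf, ih n _ h]
        omega
      · simp [PySem.Chars.count.go, List.isPrefixOf, hx, ih n _ h,
          Ne.symm hx]

lemma str_count_singleton (s sub : String) (c : Char) (h : sub.toList = [c]) :
    PySem.Str.count s sub = s.toList.count c := by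
  rw [PySem.Str.count_eq, h]
  rw [PySem.Chars.count]
  have hl : s.toList.length ≤ s.length := by rw [String.length_toList]
  simp [count_go_singleton c s.toList s.length 0 hl]

-- the loop invariant: A's fold equals carets-so-far plus ATCG letters of the stripped remainder
lemma loopA_eq (l : List Char) : ∀ (cnt : Int) (del : Bool),
    (l.foldl pvStepA (cnt, del)).1 =
      cnt + (l.count '^' : Int)
        + (((if del then pvStrip (l.dropWhile pvNonDigit) else pvStrip l).countP pvIsATCG : Nat) : Int) := by
  induction l with
  | nil => intro cnt del; cases del <;> simp [pvStrip]
  | cons x t ih =>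
    intro cnt del
    by_cases hdig : '0' ≤ x ∧ x ≤ '9'
    · have hnc : x ≠ '^' := by rintro rfl; revert hdig; decide
      have hnd : pvNonDigit x = false := by
        simp [pvNonDigit, hdig.1, hdig.2]
      have hna : pvIsATCG x = false := by
        simp only [pvIsATCG, decide_eq_false_iff_not]
        rintro (rfl | rfl | rfl | rfl) <;> revert hdig <;> decide
      cases del <;>
        simp [pvStepA, hdig, ih, hnd, pvStrip, hnc, hna]
    · have hnd : pvNonDigit x = true := by
        simp only [pvNonDigit, Bool.not_eq_true']
        rw [Bool.and_eq_false_iff]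
        rcases Decidable.not_and_iff_not_or_not.mp hdig with h | h
        · exact Or.inl (by simpa using h)
        · exact Or.inr (by simpa using h)
      by_cases hc : x = '^'
      · subst hc
        cases del <;>
          simp [pvStepA, ih, pvStrip, hnd] <;> ring
      · by_cases ha : x = 'A' ∨ x = 'T' ∨ x = 'C' ∨ x = 'G'
        · have hap : pvIsATCG x = true := by simp [pvIsATCG, ha]
          cases del with
          | false =>
            simp [pvStepA, hdig, ha, ih, hc, pvStrip, hap]
            ring
          | true =>
            simp [pvStepA, hdig, ha, ih, hc, hnd]
        · have hap : pvIsATCG x = false := by simp [pvIsATCG, ha]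
          cases del with
          | false =>
            simp [pvStepA, hdig, ha, ih, hc, pvStrip, hap]
          | true =>
            simp [pvStepA, hdig, ha, ih, hc, hnd]

-- ===== VERDICT (by name: the statement is the Claim_ definition above) =====
theorem mutate_count_spec : Claim_equal_mutate_count := by
  intro Cigar MD_tag _
  unfold Spec_mutate_count mutate_count mutate_count_alt
  have h1 : PySem.Str.count MD_tag "^" = MD_tag.toList.count '^' :=
    str_count_singleton MD_tag "^" '^' rfl
  simp only [loopA_eq MD_tag.toList 0 false, if_neg, Bool.false_eq_true,
    not_false_iff, h1]
  ring
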